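-- pv_equiv track=rewrite | github.com/TimCodes/vuln-agent-freya | agent-api/app/utils/csv_parser.py | _build_column_index
-- ===== SOURCE A (Python) =====
-- from typing import Iterable
--
-- _COLUMN_ALIASES: dict[str, tuple[str, ...]] = {
--     "package": ("name/package", "package", "name"),
--     "cve": ("id", "cve", "cve id"),
--     "location": ("location", "repo", "repository"),
--     "severity": ("severity",),
--     "description": ("description",),
--     "unique_id": ("unique id", "uniqueid", "row id"),
--     "fixed_version": ("fixed version", "fixed_version", "fix version"),
-- }
--
-- def _build_column_index(fieldnames: Iterable[str]) -> dict[str, str]: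
--     """Return a mapping of our canonical keys → the CSV header actually used."""
--     lowered = {name.lower().strip(): name for name in fieldnames if name}
--     resolved: dict[str, str] = {}
--     for canonical, aliases in _COLUMN_ALIASES.items():
--         for alias in aliases:
--             if alias in lowered:
--                 resolved[canonical] = lowered[alias]
--                 break
--     return resolved
-- ===== SOURCE B (Python) =====
-- from typing import Iterable
--
-- # Inverted index: lowered header spelling -> (canonical key, priority of that spelling).
-- _ALIAS_INDEX: dict[str, tuple[str, int]] = {
--     "name/package": ("package", 0), "package": ("package", 1), "name": ("package", 2),
--     "id": ("cve", 0), "cve": ("cve", 1), "cve id": ("cve", 2),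
--     "location": ("location", 0), "repo": ("location", 1), "repository": ("location", 2),
--     "severity": ("severity", 0),
--     "description": ("description", 0),
--     "unique id": ("unique_id", 0), "uniqueid": ("unique_id", 1), "row id": ("unique_id", 2),
--     "fixed version": ("fixed_version", 0), "fixed_version": ("fixed_version", 1),
--     "fix version": ("fixed_version", 2),
-- }
--
-- _CANONICAL_ORDER = ("package", "cve", "location", "severity", "description",
--                     "unique_id", "fixed_version")
--
-- def _build_column_index(fieldnames: Iterable[str]) -> dict[str, str]:
--     """Return a mapping of our canonical keys → the CSV header actually used."""
--     best: dict[str, tuple[int, str]] = {}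
--     for name in fieldnames:
--         if not name:
--             continue
--         hit = _ALIAS_INDEX.get(name.lower().strip())
--         if hit is None:
--             continue
--         canonical, priority = hit
--         if canonical not in best or priority <= best[canonical][0]:
--             best[canonical] = (priority, name)
--     return {c: best[c][1] for c in _CANONICAL_ORDER if c in best}
-- ===== Notes on version B (the rewrite author's own statement) =====
-- stated objective: alternative
-- what changed: B inverts the loop structure: instead of building a lowered-header dict and then scanning the alias table with an inner alias loop and break, it keeps the alias table as a precomputed inverted index (lowered spelling -> (canonical, priority)) and makes a single pass over the headers, keeping per canonical key the best-priority header (latest header on equal priority), then emits the result in canonical order.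
import Mathlib
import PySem

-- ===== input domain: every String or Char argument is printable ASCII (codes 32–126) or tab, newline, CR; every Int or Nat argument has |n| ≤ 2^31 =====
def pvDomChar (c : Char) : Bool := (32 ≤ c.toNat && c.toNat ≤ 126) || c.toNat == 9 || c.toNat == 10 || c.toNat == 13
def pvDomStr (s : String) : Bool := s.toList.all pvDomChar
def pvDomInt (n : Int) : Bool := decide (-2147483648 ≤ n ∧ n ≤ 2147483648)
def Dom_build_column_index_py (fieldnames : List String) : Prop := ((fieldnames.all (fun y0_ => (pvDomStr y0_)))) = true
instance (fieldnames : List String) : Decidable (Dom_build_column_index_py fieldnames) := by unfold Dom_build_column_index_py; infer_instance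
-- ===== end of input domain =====

-- B replaces A's lowered-header dict + alias-table scan by a precomputed inverted
-- alias index and a single pass over the headers (objective: alternative, same cost).

-- the module constant _COLUMN_ALIASES, shared by both Pythons
def pvAliasTable : List (String × List String) :=
  [("package", ["name/package", "package", "name"]),
   ("cve", ["id", "cve", "cve id"]),
   ("location", ["location", "repo", "repository"]),
   ("severity", ["severity"]),
   ("description", ["description"]),
   ("unique_id", ["unique id", "uniqueid", "row id"]),
   ("fixed_version", ["fixed version", "fixed_version", "fix version"])]

-- name.lower().strip(), the key expression both Pythons write
def pvKey (name : String) : String := PySem.Str.strip (PySem.Str.lower name)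

-- ===== PORT A =====
-- 'for alias in aliases: if alias in lowered: return lowered[alias]' (the break)
def pvFirstAlias (lowered : PySem.Dict String String) : List String → Option String
  | [] => none
  | a :: rest =>
    match lowered.get? a with
    | some v => some v
    | none => pvFirstAlias lowered rest

def build_column_index_py (fieldnames : List String) : List (String × String) :=
  let lowered : PySem.Dict String String :=
    fieldnames.foldl (fun d name => if name ≠ "" then d.insert (pvKey name) name else d)
      PySem.Dict.empty
  (pvAliasTable.foldl
    (fun resolved p =>
      match pvFirstAlias lowered p.2 with
      | some v => resolved.insert p.1 v
      | none => resolved)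
    (PySem.Dict.empty : PySem.Dict String String)).items

-- ===== PORT B =====
-- the module constant _ALIAS_INDEX: lowered header spelling -> (canonical key, priority)
def pvAliasIndex : PySem.Dict String (String × Int) :=
  PySem.Dict.ofList
    [("name/package", ("package", 0)), ("package", ("package", 1)), ("name", ("package", 2)),
     ("id", ("cve", 0)), ("cve", ("cve", 1)), ("cve id", ("cve", 2)),
     ("location", ("location", 0)), ("repo", ("location", 1)), ("repository", ("location", 2)),
     ("severity", ("severity", 0)),
     ("description", ("description", 0)),
     ("unique id", ("unique_id", 0)), ("uniqueid", ("unique_id", 1)), ("row id", ("unique_id", 2)),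
     ("fixed version", ("fixed_version", 0)), ("fixed_version", ("fixed_version", 1)),
     ("fix version", ("fixed_version", 2))]

-- the module constant _CANONICAL_ORDER
def pvCanonicalOrder : List String :=
  ["package", "cve", "location", "severity", "description", "unique_id", "fixed_version"]

-- the body of B's single loop over the headers
def pvStep (best : PySem.Dict String (Int × String)) (name : String) :
    PySem.Dict String (Int × String) :=
  if name ≠ "" then
    match pvAliasIndex.get? (pvKey name) with
    | none => best
    | some (canonical, priority) =>
      match best.get? canonical with
      | none => best.insert canonical (priority, name)
      | some pr => if priority ≤ pr.1 then best.insert canonical (priority, name) else best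
  else best

def build_column_index_py_alt (fieldnames : List String) : List (String × String) :=
  let best := fieldnames.foldl pvStep (PySem.Dict.empty : PySem.Dict String (Int × String))
  -- '{c: best[c][1] for c in _CANONICAL_ORDER if c in best}'
  (pvCanonicalOrder.foldl
    (fun out c =>
      match best.get? c with
      | some pr => out.insert c pr.2
      | none => out)
    (PySem.Dict.empty : PySem.Dict String String)).items

-- ===== PRECONDITION & SPEC =====
def Spec_build_column_index_py (fieldnames : List String) (out : List (String × String)) : Prop := out = build_column_index_py_alt fieldnames
instance (fieldnames : List String) (out : List (String × String)) : Decidable (Spec_build_column_index_py fieldnames out) := by unfold Spec_build_column_index_py; infer_instance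

-- ===== CLAIM =====
def Claim_equal_build_column_index_py : Prop := ∀ (fieldnames : List String), Dom_build_column_index_py fieldnames → Spec_build_column_index_py fieldnames (build_column_index_py fieldnames)

-- ===== LEMMAS AND PROOFS =====

-- reference function: first alias of the list present in 'lowered', with its priority
def pvFAR (lowered : PySem.Dict String String) : List String → Int → Option (Int × String)
  | [], _ => none
  | a :: rest, r =>
    match lowered.get? a with
    | some v => some (r, v)
    | none => pvFAR lowered rest (r + 1)

lemma pvFirstAlias_eq_map_fAR (lowered : PySem.Dict String String) (as : List String) (r : Int) :
    pvFirstAlias lowered as = (pvFAR lowered as r).map (·.2) := by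
  induction as generalizing r with
  | nil => rfl
  | cons a rest ih =>
    rw [pvFirstAlias, pvFAR]
    cases lowered.get? a with
    | some v => rfl
    | none => exact ih (r + 1)

lemma pvFAR_empty (as : List String) (r : Int) :
    pvFAR PySem.Dict.empty as r = none := by
  induction as generalizing r with
  | nil => rfl
  | cons a rest ih => rw [pvFAR, PySem.Dict.get?_empty]; exact ih (r + 1)

lemma pvFAR_insert_not_mem (d : PySem.Dict String String) (s x : String) (as : List String)
    (hs : s ∉ as) (r : Int) : pvFAR (d.insert s x) as r = pvFAR d as r := by
  induction as generalizing r with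
  | nil => rfl
  | cons a rest ih =>
    rw [pvFAR, pvFAR, PySem.Dict.get?_insert_of_ne _ _ (by intro h; exact hs (h ▸ List.mem_cons_self))]
    cases d.get? a with
    | some v => rfl
    | none => exact ih (fun h => hs (List.mem_cons_of_mem _ h)) (r + 1)

lemma pvFAR_append (d : PySem.Dict String String) (l1 l2 : List String) (r : Int) :
    pvFAR d (l1 ++ l2) r = (pvFAR d l1 r).or (pvFAR d l2 (r + l1.length)) := by
  induction l1 generalizing r with
  | nil => simp [pvFAR]
  | cons a rest ih =>
    rw [List.cons_append, pvFAR, pvFAR]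
    cases d.get? a with
    | some v => rfl
    | none =>
      rw [ih (r + 1)]
      have h1 : r + 1 + (rest.length : Int) = r + ((a :: rest).length : Int) := by
        push_cast [List.length_cons]; ring
      rw [h1]

lemma pvFAR_insert_split (d : PySem.Dict String String) (pre post : List String) (s x : String)
    (hs : s ∉ pre) (r : Int) :
    pvFAR (d.insert s x) (pre ++ s :: post) r = (pvFAR d pre r).or (some (r + pre.length, x)) := by
  induction pre generalizing r with
  | nil => simp [pvFAR, PySem.Dict.get?_insert_self]
  | cons a rest ih =>
    rw [List.cons_append, pvFAR, pvFAR,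
      PySem.Dict.get?_insert_of_ne _ _ (by intro h; exact hs (h ▸ List.mem_cons_self))]
    cases d.get? a with
    | some v => rfl
    | none =>
      rw [ih (fun h => hs (List.mem_cons_of_mem _ h)) (r + 1)]
      have h1 : r + 1 + (rest.length : Int) = r + ((a :: rest).length : Int) := by
        push_cast [List.length_cons]; ring
      rw [h1]

lemma pvFAR_some_ge (d : PySem.Dict String String) (as : List String) (r' r : Int) (v : String)
    (h : pvFAR d as r' = some (r, v)) : r' ≤ r := by
  induction as generalizing r' with
  | nil => simp [pvFAR] at h
  | cons a rest ih =>
    rw [pvFAR] at h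
    cases hg : d.get? a with
    | some w => rw [hg] at h; simp at h; omega
    | none => rw [hg] at h; have := ih (r' + 1) h; omega

lemma pvFAR_some_lt (d : PySem.Dict String String) (as : List String) (r' r : Int) (v : String)
    (h : pvFAR d as r' = some (r, v)) : r < r' + as.length := by
  induction as generalizing r' with
  | nil => simp [pvFAR] at h
  | cons a rest ih =>
    rw [pvFAR] at h
    cases hg : d.get? a with
    | some w =>
      rw [hg] at h; simp at h
      simp only [List.length_cons]
      push_cast; omega
    | none =>
      rw [hg] at h
      have := ih (r' + 1) h
      simp only [List.length_cons]
      push_cast at this ⊢; omega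

-- the two facts about the constant inverted index, stated for an arbitrary string key
lemma pvIndex_none (s : String) (h : pvAliasIndex.get? s = none) :
    ∀ p ∈ pvAliasTable, s ∉ p.2 := by
  have hk : s ∉ ["name/package", "package", "name", "id", "cve", "cve id", "location", "repo",
      "repository", "severity", "description", "unique id", "uniqueid", "row id",
      "fixed version", "fixed_version", "fix version"] := by
    rw [show ["name/package", "package", "name", "id", "cve", "cve id", "location", "repo",
      "repository", "severity", "description", "unique id", "uniqueid", "row id",
      "fixed version", "fixed_version", "fix version"] = pvAliasIndex.keys from rfl]
    exact (PySem.Dict.get?_eq_none_iff_not_mem_keys _ _).mp h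
  simp only [List.mem_cons, List.not_mem_nil, or_false, not_or] at hk
  intro p hp hsp
  fin_cases hp <;> simp_all

lemma pvIndex_some (s c0 : String) (r0 : Int)
    (h : pvAliasIndex.get? s = some (c0, r0)) :
    ∃ pre post, (c0, pre ++ s :: post) ∈ pvAliasTable ∧ s ∉ pre ∧ r0 = (pre.length : Int) ∧
      (∀ p ∈ pvAliasTable, p.1 ≠ c0 → s ∉ p.2) ∧
      (∀ p ∈ pvAliasTable, p.1 = c0 → p.2 = pre ++ s :: post) := by
  have hmem : (s, (c0, r0)) ∈ pvAliasIndex.items := PySem.Dict.mem_items_of_get?_eq_some _ h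
  rw [show pvAliasIndex.items =
      [("name/package", ("package", 0)),
        ("package", ("package", 1)),
        ("name", ("package", 2)),
        ("id", ("cve", 0)),
        ("cve", ("cve", 1)),
        ("cve id", ("cve", 2)),
        ("location", ("location", 0)),
        ("repo", ("location", 1)),
        ("repository", ("location", 2)),
        ("severity", ("severity", 0)),
        ("description", ("description", 0)),
        ("unique id", ("unique_id", 0)),
        ("uniqueid", ("unique_id", 1)),
        ("row id", ("unique_id", 2)),
        ("fixed version", ("fixed_version", 0)),
        ("fixed_version", ("fixed_version", 1)),
        ("fix version", ("fixed_version", 2))] from rfl] at hmem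
  simp only [List.mem_cons, List.not_mem_nil, or_false, Prod.mk.injEq] at hmem
  rcases hmem with ⟨hs, hc, hr⟩|⟨hs, hc, hr⟩|⟨hs, hc, hr⟩|⟨hs, hc, hr⟩|⟨hs, hc, hr⟩|⟨hs, hc, hr⟩|⟨hs, hc, hr⟩|⟨hs, hc, hr⟩|⟨hs, hc, hr⟩|⟨hs, hc, hr⟩|⟨hs, hc, hr⟩|⟨hs, hc, hr⟩|⟨hs, hc, hr⟩|⟨hs, hc, hr⟩|⟨hs, hc, hr⟩|⟨hs, hc, hr⟩|⟨hs, hc, hr⟩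
  · subst hs; subst hc; subst hr; exact ⟨[], ["package", "name"], by decide, by decide, by decide, by decide, by decide⟩
  · subst hs; subst hc; subst hr; exact ⟨["name/package"], ["name"], by decide, by decide, by decide, by decide, by decide⟩
  · subst hs; subst hc; subst hr; exact ⟨["name/package", "package"], [], by decide, by decide, by decide, by decide, by decide⟩
  · subst hs; subst hc; subst hr; exact ⟨[], ["cve", "cve id"], by decide, by decide, by decide, by decide, by decide⟩
  · subst hs; subst hc; subst hr; exact ⟨["id"], ["cve id"], by decide, by decide, by decide, by decide, by decide⟩
  · subst hs; subst hc; subst hr; exact ⟨["id", "cve"], [], by decide, by decide, by decide, by decide, by decide⟩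
  · subst hs; subst hc; subst hr; exact ⟨[], ["repo", "repository"], by decide, by decide, by decide, by decide, by decide⟩
  · subst hs; subst hc; subst hr; exact ⟨["location"], ["repository"], by decide, by decide, by decide, by decide, by decide⟩
  · subst hs; subst hc; subst hr; exact ⟨["location", "repo"], [], by decide, by decide, by decide, by decide, by decide⟩
  · subst hs; subst hc; subst hr; exact ⟨[], [], by decide, by decide, by decide, by decide, by decide⟩
  · subst hs; subst hc; subst hr; exact ⟨[], [], by decide, by decide, by decide, by decide, by decide⟩
  · subst hs; subst hc; subst hr; exact ⟨[], ["uniqueid", "row id"], by decide, by decide, by decide, by decide, by decide⟩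
  · subst hs; subst hc; subst hr; exact ⟨["unique id"], ["row id"], by decide, by decide, by decide, by decide, by decide⟩
  · subst hs; subst hc; subst hr; exact ⟨["unique id", "uniqueid"], [], by decide, by decide, by decide, by decide, by decide⟩
  · subst hs; subst hc; subst hr; exact ⟨[], ["fixed_version", "fix version"], by decide, by decide, by decide, by decide, by decide⟩
  · subst hs; subst hc; subst hr; exact ⟨["fixed version"], ["fix version"], by decide, by decide, by decide, by decide, by decide⟩
  · subst hs; subst hc; subst hr; exact ⟨["fixed version", "fixed_version"], [], by decide, by decide, by decide, by decide, by decide⟩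

-- the single-pass loop's invariant: per canonical key, 'best' holds exactly the
-- first-present alias (with priority) that A would read off its lowered dict
lemma pvInv (xs : List String) :
    ∀ p ∈ pvAliasTable,
      (xs.foldl pvStep PySem.Dict.empty).get? p.1
        = pvFAR (xs.foldl (fun d name => if name ≠ "" then d.insert (pvKey name) name else d)
            PySem.Dict.empty) p.2 0 := by
  induction xs using List.reverseRecOn with
  | nil =>
    intro p hp
    simp [PySem.Dict.get?_empty, pvFAR_empty]
  | append_singleton ys x ih =>
    intro p hp
    rw [List.foldl_append, List.foldl_append]
    simp only [List.foldl_cons, List.foldl_nil]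
    by_cases hx : x = ""
    · rw [pvStep, if_neg (by simpa using hx), if_neg (by simpa using hx)]
      exact ih p hp
    · rw [pvStep, if_pos hx, if_pos hx]
      cases hidx : pvAliasIndex.get? (pvKey x) with
      | none =>
        rw [pvFAR_insert_not_mem _ _ _ _ (pvIndex_none _ hidx p hp)]
        exact ih p hp
      | some cr =>
        obtain ⟨c0, r0⟩ := cr
        obtain ⟨pre, post, hmem0, hpre, hr0, hother, huniq⟩ := pvIndex_some _ c0 r0 hidx
        dsimp only
        by_cases hc : p.1 = c0
        · have has : p.2 = pre ++ pvKey x :: post := huniq p hp hc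
          have hB := ih (c0, pre ++ pvKey x :: post) hmem0
          simp only at hB
          rw [pvFAR_append] at hB
          rw [hc, has, pvFAR_insert_split _ _ _ _ _ hpre 0]
          cases hp0 : pvFAR (ys.foldl
              (fun d name => if name ≠ "" then d.insert (pvKey name) name else d)
              PySem.Dict.empty) pre 0 with
          | some rv =>
            rw [hp0, Option.some_or] at hB
            have hlt : rv.1 < (0 : Int) + pre.length := pvFAR_some_lt _ _ _ _ rv.2 hp0
            have hnle : ¬ r0 ≤ rv.1 := by omega
            rw [Option.some_or, hB]
            dsimp only
            rw [if_neg hnle]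
            exact hB
          | none =>
            rw [hp0, Option.none_or] at hB
            rw [Option.none_or]
            cases hp1 : pvFAR (ys.foldl
                (fun d name => if name ≠ "" then d.insert (pvKey name) name else d)
                PySem.Dict.empty) (pvKey x :: post) (0 + (pre.length : Int)) with
            | none =>
              rw [hp1] at hB
              rw [hB]
              dsimp only
              rw [PySem.Dict.get?_insert_self]
              have hr : r0 = (0 : Int) + pre.length := by omega
              rw [hr]
            | some rv =>
              rw [hp1] at hB
              have hge : (0 : Int) + pre.length ≤ rv.1 := pvFAR_some_ge _ _ _ _ rv.2 hp1
              have hle : r0 ≤ rv.1 := by omega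
              rw [hB]
              dsimp only
              rw [if_pos hle, PySem.Dict.get?_insert_self]
              have hr : r0 = (0 : Int) + pre.length := by omega
              rw [hr]
        · rw [pvFAR_insert_not_mem _ _ _ _ (hother p hp hc)]
          cases (ys.foldl pvStep PySem.Dict.empty).get? c0 with
          | none => rw [PySem.Dict.get?_insert_of_ne _ _ hc]; exact ih p hp
          | some pr =>
            by_cases hle : r0 ≤ pr.1
            · simp only [hle, if_true]
              rw [PySem.Dict.get?_insert_of_ne _ _ hc]; exact ih p hp
            · simp only [hle, if_false]
              exact ih p hp

-- ===== VERDICT =====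
theorem build_column_index_py_spec : Claim_equal_build_column_index_py := by
  intro fieldnames _
  unfold Spec_build_column_index_py build_column_index_py build_column_index_py_alt
  dsimp only
  refine congrArg PySem.Dict.items ?_
  rw [show pvCanonicalOrder = pvAliasTable.map (fun p => p.1) from rfl, List.foldl_map]
  apply PySem.List.foldl_congr_mem
  intro acc p hp
  have h := pvInv fieldnames p hp
  rw [pvFirstAlias_eq_map_fAR _ _ 0, h]
  cases pvFAR (fieldnames.foldl (fun d name => if name ≠ "" then d.insert (pvKey name) name else d)
      PySem.Dict.empty) p.2 0 with
  | none => rfl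
  | some pr => rfl
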